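-- pv_equiv track=rewrite | github.com/anguillanneuf/bigO | 90 license_plate_trie_solution.py | search_prefix
-- ===== SOURCE A (Python) =====
-- class TrieNode:
--   def __init__(self, char=None, state=None):
--     self.value = char
--     self.state = state
--     self.prev = None
--     self.next = None
--
-- class TrieTree:
--   def __init__(self):
--     self.root = None
--
--   def insert(self, trieNode):
--     if self.root is None:
--       self.root=trieNode
--       return
--     currNode = self.root
--     while currNode.next is not None:
--       currNode = currNode.next
--     currNode.next = trieNode
--     currNode.next.prev = currNode
--
--   def delete(self, trieNode):
--     if self.root is None:
--       raise Exception("There are no nodes left to delete!")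
--     if trieNode.prev:
--       trieNode.prev.next = None
--     else:
--       self.root = None
--
-- def create_dict(plate):
--   plate_dict = dict()
--
--   for ch in plate:
--     ch = ch.lower()
--     if ch.isalpha():
--       if ch not in plate_dict.keys():
--         plate_dict.update({ch: 1})
--       else:
--         plate_dict[ch] += 1
--
--   return plate_dict
--
-- def check_word(prev_tree, word, plate_dict):
--   if prev_tree.root is not None:
--     curr_node = prev_tree.root
--
--   for ch in word:
--     plate_dict = plate_dict.copy()
--     if ch in plate_dict.keys():
--       plate_dict[ch] -= 1
--
--     if prev_tree.root is None:
--       prev_tree.insert(TrieNode(ch, plate_dict))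
--       curr_node = prev_tree.root
--
--     if curr_node is None:
--       curr_node = TrieNode(ch, plate_dict)
--       prev_tree.insert(curr_node)
--       curr_node = curr_node.next
--
--     elif ch == curr_node.value:
--       curr_node = curr_node.next
--
--     else:
--       prev_tree.delete(curr_node)
--       curr_node = TrieNode(ch, plate_dict)
--       prev_tree.insert(curr_node)
--       curr_node = curr_node.next
--
--   return plate_dict
--
-- def search_prefix(vocab, plate):
--
--   shortest = None
--   prev_tree = TrieTree()
--   plate_dict = create_dict(plate)
--
--   for word in vocab:
--
--     out_state = check_word(prev_tree, word, plate_dict)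
--
--     if not any(v > 0 for v in out_state.values()):
--       if shortest is None:
--         shortest = word
--       elif len(shortest)>len(word):
--         shortest = word
--
--   return shortest
-- ===== SOURCE B (Python) =====
-- def search_prefix(vocab, plate):
--   letters = [ch.lower() for ch in plate if ch.lower().isalpha()]
--   need = [(ch, letters.count(ch)) for ch in set(letters)]
--   candidates = [w for w in vocab if all(w.count(ch) >= n for ch, n in need)]
--   return min(candidates, key=len) if candidates else None
-- ===== Notes on version B (the rewrite author's own statement) =====
-- stated objective: simpler
-- what changed: B drops A's trie/linked-list bookkeeping and the per-character dict copy-and-decrement loop: it counts the plate's lowercased alphabetic letters once, filters vocab by comparing each word's letter counts against that table, and takes min(candidates, key=len), whose first-extremal rule matches A's strict-greater tie-breaking.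
import Mathlib
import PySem

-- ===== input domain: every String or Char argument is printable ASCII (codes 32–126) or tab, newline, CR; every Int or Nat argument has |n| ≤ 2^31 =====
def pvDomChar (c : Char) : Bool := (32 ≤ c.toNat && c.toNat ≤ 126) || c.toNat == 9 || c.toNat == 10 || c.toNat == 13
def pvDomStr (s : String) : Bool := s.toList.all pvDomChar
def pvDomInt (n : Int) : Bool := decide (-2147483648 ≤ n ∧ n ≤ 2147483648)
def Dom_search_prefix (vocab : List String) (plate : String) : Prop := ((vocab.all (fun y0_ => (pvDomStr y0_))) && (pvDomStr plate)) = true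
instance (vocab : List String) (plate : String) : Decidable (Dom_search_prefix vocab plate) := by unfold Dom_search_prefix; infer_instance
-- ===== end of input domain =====

-- B drops A's trie bookkeeping entirely: count the plate letters, filter the covering words, take min by length (objective: simpler).

-- ===== PORT A =====
-- A's TrieTree is a singly linked list of TrieNode(value, state): `insert` appends at the
-- tail, `delete` truncates. It is modelled as a `List (Char × Dict)` of (value, state) pairs,
-- and the `curr_node` pointer as `Option Nat` (an index into that list; `none` = the Python
-- `None` pointer). This is exact: the pointers used are only the root, a node's `next`, `None`.
def create_dict (plate : String) : PySem.Dict Char Int :=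
  plate.toList.foldl (fun plate_dict ch0 =>
    let ch := PySem.Chars.lowerChar ch0            -- ch = ch.lower()
    if PySem.Chars.isalpha ch then
      if ¬ plate_dict.contains ch then
        plate_dict.insert ch 1                     -- plate_dict.update({ch: 1})
      else
        plate_dict.modify ch 0 (· + 1)             -- plate_dict[ch] += 1 (key present)
    else plate_dict) PySem.Dict.empty

-- one iteration of check_word's `for ch in word` loop; state = (tree, curr_node, plate_dict)
def check_word_step (st : (List (Char × PySem.Dict Char Int)) × Option Nat × PySem.Dict Char Int)
    (ch : Char) : (List (Char × PySem.Dict Char Int)) × Option Nat × PySem.Dict Char Int :=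
  let tree := st.1
  let curr := st.2.1
  -- plate_dict = plate_dict.copy(); if ch in plate_dict.keys(): plate_dict[ch] -= 1
  let d := if st.2.2.contains ch then st.2.2.modify ch 0 (· - 1) else st.2.2
  -- if prev_tree.root is None: prev_tree.insert(TrieNode(ch, plate_dict)); curr_node = prev_tree.root
  let tc := if tree.isEmpty then ([(ch, d)], some 0) else (tree, curr)
  match tc.2 with
  | none =>
      -- if curr_node is None: insert at the tail; curr_node = curr_node.next (= None, it is last)
      (tc.1 ++ [(ch, d)], none, d)
  | some i =>
      if ch = (tc.1.getD i (ch, d)).1 then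
        -- elif ch == curr_node.value: curr_node = curr_node.next
        (tc.1, if i + 1 < tc.1.length then some (i + 1) else none, d)
      else
        -- else: prev_tree.delete(curr_node) — truncate before index i (root = None if i = 0) —
        -- then insert the new node; curr_node = curr_node.next (= None)
        ((if i = 0 then [] else tc.1.take i) ++ [(ch, d)], none, d)

def check_word (prev_tree : List (Char × PySem.Dict Char Int)) (word : String)
    (plate_dict : PySem.Dict Char Int) : (List (Char × PySem.Dict Char Int)) × PySem.Dict Char Int :=
  -- if prev_tree.root is not None: curr_node = prev_tree.root  (else curr_node is unbound:
  -- with a nonempty word the first iteration assigns it before use; `none` is a free stand-in)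
  let curr0 : Option Nat := if prev_tree.isEmpty then none else some 0
  let st := word.toList.foldl check_word_step (prev_tree, curr0, plate_dict)
  (st.1, st.2.2)

def search_prefix (vocab : List String) (plate : String) : Option String :=
  let plate_dict := create_dict plate
  (vocab.foldl (fun (st : Option String × List (Char × PySem.Dict Char Int)) word =>
    let res := check_word st.2 word plate_dict
    let shortest :=
      if ¬ (res.2.values.any (fun v => decide (v > 0))) then
        match st.1 with
        | none => some word                                                  -- shortest = word
        | some s => if PySem.Str.len s > PySem.Str.len word then some word else st.1
      else st.1
    (shortest, res.1)) (none, [])).1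

-- ===== PORT B =====
def search_prefix_alt (vocab : List String) (plate : String) : Option String :=
  -- letters = [ch.lower() for ch in plate if ch.lower().isalpha()]
  let letters := (plate.toList.filter
      (fun ch => PySem.Chars.isalpha (PySem.Chars.lowerChar ch))).map PySem.Chars.lowerChar
  -- need = [(ch, letters.count(ch)) for ch in set(letters)]   (all() below is order-insensitive,
  -- so the hash iteration order of the Python set cannot affect the result)
  let need := (PySem.Set.ofList letters).map (fun ch => (ch, PySem.List.count letters ch))
  -- candidates = [w for w in vocab if all(w.count(ch) >= n for ch, n in need)]
  let candidates := vocab.filter (fun w =>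
    need.all (fun p => p.2 ≤ PySem.Str.count w (String.ofList [p.1])))
  -- min(candidates, key=len) if candidates else None   (min? is none exactly on [])
  PySem.List.min? candidates (fun w => PySem.Str.len w)

-- ===== PRECONDITION & SPEC =====
def Spec_search_prefix (vocab : List String) (plate : String) (out : Option String) : Prop := out = search_prefix_alt vocab plate
instance (vocab : List String) (plate : String) (out : Option String) : Decidable (Spec_search_prefix vocab plate out) := by unfold Spec_search_prefix; infer_instance

-- ===== CLAIM (what is proved, stated in full; the proofs are below) =====
def Claim_equal_search_prefix : Prop := ∀ (vocab : List String) (plate : String), Dom_search_prefix vocab plate → Spec_search_prefix vocab plate (search_prefix vocab plate)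

-- ===== LEMMAS AND PROOFS =====

-- the dict component of one check_word_step, in isolation
def decStep (d : PySem.Dict Char Int) (ch : Char) : PySem.Dict Char Int :=
  if d.contains ch then d.modify ch 0 (· - 1) else d

theorem check_word_step_snd (st : (List (Char × PySem.Dict Char Int)) × Option Nat × PySem.Dict Char Int)
    (ch : Char) : (check_word_step st ch).2.2 = decStep st.2.2 ch := by
  obtain ⟨tree, curr, d0⟩ := st
  simp only [check_word_step, decStep]
  split
  · simp
  · split_ifs <;> rfl

theorem foldl_check_word_step_snd (l : List Char) :
    ∀ st, (l.foldl check_word_step st).2.2 = l.foldl decStep st.2.2 := by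
  induction l with
  | nil => intro st; rfl
  | cons c t ih =>
      intro st
      simp only [List.foldl_cons]
      rw [ih, check_word_step_snd]

-- A's per-word update of `shortest`, in isolation (depends only on the word and the plate dict)
def pureStep (D : PySem.Dict Char Int) (s : Option String) (word : String) : Option String :=
  if ¬ ((word.toList.foldl decStep D).values.any (fun v => decide (v > 0))) then
    match s with
    | none => some word
    | some m => if PySem.Str.len m > PySem.Str.len word then some word else some m
  else s

-- the trie state never feeds back into the `shortest` accumulator
theorem search_prefix_foldl_fst (D : PySem.Dict Char Int) (vocab : List String) :
    ∀ (s : Option String) (t : List (Char × PySem.Dict Char Int)),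
    (vocab.foldl (fun (st : Option String × List (Char × PySem.Dict Char Int)) word =>
      let res := check_word st.2 word D
      let shortest :=
        if ¬ (res.2.values.any (fun v => decide (v > 0))) then
          match st.1 with
          | none => some word
          | some s => if PySem.Str.len s > PySem.Str.len word then some word else st.1
        else st.1
      (shortest, res.1)) (s, t)).1
    = vocab.foldl (pureStep D) s := by
  induction vocab with
  | nil => intro s t; rfl
  | cons w ws ih =>
      intro s t
      simp only [List.foldl_cons]
      rw [ih]
      congr 1
      have hsnd : (check_word t w D).2 = w.toList.foldl decStep D := by
        simp only [check_word]
        exact foldl_check_word_step_snd _ _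
      simp only [pureStep, hsnd]
      cases s <;> rfl

-- decStep preserves the key list …
theorem keys_decStep (d : PySem.Dict Char Int) (c : Char) : (decStep d c).keys = d.keys := by
  simp only [decStep]
  split
  · rw [PySem.Dict.keys_modify]
    exact PySem.Dict.keys_insert_of_contains d _ (by assumption)
  · rfl

theorem keys_foldl_decStep (l : List Char) :
    ∀ d : PySem.Dict Char Int, (l.foldl decStep d).keys = d.keys := by
  induction l with
  | nil => intro d; rfl
  | cons c t ih => intro d; simp only [List.foldl_cons]; rw [ih, keys_decStep]

-- … and, on a key of the dict, subtracts that key's count in the consumed chars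
theorem getD_foldl_decStep (l : List Char) :
    ∀ d : PySem.Dict Char Int, ∀ k, d.contains k = true →
    (l.foldl decStep d).getD k 0 = d.getD k 0 - l.count k := by
  induction l with
  | nil => intro d k _; simp
  | cons c t ih =>
      intro d k hk
      simp only [List.foldl_cons]
      have hcont : (decStep d c).contains k = true := by
        rw [PySem.Dict.contains_iff_mem_keys, keys_decStep, ← PySem.Dict.contains_iff_mem_keys]
        exact hk
      rw [ih _ k hcont]
      simp only [decStep]
      by_cases hc : d.contains c
      · rw [if_pos hc, PySem.Dict.getD_modify]
        by_cases hkc : k = c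
        · subst hkc
          rw [if_pos rfl, List.count_cons_self]
          push_cast
          ring
        · rw [if_neg hkc]
          simp [Ne.symm hkc]
      · rw [if_neg hc]
        have hkc : k ≠ c := by
          intro h; subst h; rw [hk] at hc; exact hc rfl
        simp [Ne.symm hkc]

-- create_dict is Counter of the lowercased alphabetic plate characters
theorem create_dict_eq_counter (plate : String) :
    create_dict plate = PySem.Dict.counter
      ((plate.toList.filter
        (fun ch => PySem.Chars.isalpha (PySem.Chars.lowerChar ch))).map PySem.Chars.lowerChar) := by
  rw [PySem.Dict.counter_eq_foldl, List.foldl_map, List.foldl_filter]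
  unfold create_dict
  congr 1
  funext d c
  by_cases ha : PySem.Chars.isalpha (PySem.Chars.lowerChar c)
  · rw [if_pos ha]
    simp only [if_pos ha]
    by_cases hc : d.contains (PySem.Chars.lowerChar c)
    · simp [hc]
    · rw [if_pos (by simp [hc]), PySem.Dict.modify,
        PySem.Dict.getD_of_not_contains d 0 (by simpa using hc)]
      norm_num
  · simp [ha]

theorem count_go_singleton (c : Char) (fuel : Nat) : ∀ (s : List Char) (acc : Nat), s.length ≤ fuel →
    PySem.Chars.count.go [c] fuel s acc = acc + s.count c := by
  induction fuel with
  | zero =>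
    intro s acc h
    have : s = [] := by cases s <;> simp_all
    subst this; simp [PySem.Chars.count.go]
  | succ n ih =>
    intro s acc h
    cases s with
    | nil => simp [PySem.Chars.count.go]
    | cons hd t =>
      rw [PySem.Chars.count.go]
      have hpre : [c].isPrefixOf (hd :: t) = (c == hd) := by simp [List.isPrefixOf]
      rw [hpre]
      by_cases hc : c = hd
      · subst hc
        simp only [BEq.rfl, if_pos, List.length_singleton, List.drop_one, List.tail_cons]
        rw [ih t (acc + 1) (by simpa using h)]
        rw [List.count_cons]
        simp
        omega
      · rw [if_neg (by simp [hc])]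
        rw [ih t acc (by simpa using h)]
        rw [List.count_cons]
        simp [Ne.symm hc]

-- str.count with a single-character needle is the character count
theorem chars_count_singleton (s : List Char) (c : Char) : PySem.Chars.count s [c] = s.count c := by
  rw [PySem.Chars.count]
  simp [count_go_singleton c s.length s 0 (le_refl _)]

-- A's acceptance test agrees with B's filter predicate
theorem covers_iff (plate w : String) :
    (¬ (((w.toList.foldl decStep (create_dict plate)).values.any (fun v => decide (v > 0))) = true))
    ↔ (((PySem.Set.ofList ((plate.toList.filter
          (fun ch => PySem.Chars.isalpha (PySem.Chars.lowerChar ch))).map PySem.Chars.lowerChar)).map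
        (fun ch => (ch, PySem.List.count ((plate.toList.filter
          (fun ch => PySem.Chars.isalpha (PySem.Chars.lowerChar ch))).map PySem.Chars.lowerChar) ch))).all
        (fun p => p.2 ≤ PySem.Str.count w (String.ofList [p.1])) = true) := by
  rw [create_dict_eq_counter]
  simp only [List.all_map]
  set letters := (plate.toList.filter
      (fun ch => PySem.Chars.isalpha (PySem.Chars.lowerChar ch))).map PySem.Chars.lowerChar with hl
  have hkeys : (w.toList.foldl decStep (PySem.Dict.counter letters)).keys
      = PySem.Set.ofList letters := by
    rw [keys_foldl_decStep, PySem.Dict.keys_counter]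
  have hnodup : (w.toList.foldl decStep (PySem.Dict.counter letters)).keys.Nodup := by
    rw [hkeys]; exact PySem.Set.nodup_ofList letters
  rw [PySem.Dict.values_eq_map_keys _ hnodup 0, hkeys]
  simp only [List.any_map, List.any_eq_true, List.all_eq_true, Function.comp_apply, decide_eq_true_eq]
  constructor
  · intro h ch hch
    have hcont : (PySem.Dict.counter letters).contains ch = true := by
      rw [PySem.Dict.contains_iff_mem_keys, PySem.Dict.keys_counter]; exact hch
    have hv := getD_foldl_decStep w.toList _ ch hcont
    have hnot : ¬ (0 < (w.toList.foldl decStep (PySem.Dict.counter letters)).getD ch 0) :=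
      fun hpos => h ⟨ch, hch, hpos⟩
    rw [hv, PySem.Dict.getD_counter] at hnot
    rw [PySem.Str.count_eq]
    have : (String.ofList [ch]).toList = [ch] := by simp
    rw [this, chars_count_singleton, PySem.List.count_eq]
    omega
  · rintro h ⟨ch, hch, hpos⟩
    have hcont : (PySem.Dict.counter letters).contains ch = true := by
      rw [PySem.Dict.contains_iff_mem_keys, PySem.Dict.keys_counter]; exact hch
    rw [getD_foldl_decStep w.toList _ ch hcont, PySem.Dict.getD_counter] at hpos
    have := h ch hch
    rw [PySem.Str.count_eq] at this
    have he : (String.ofList [ch]).toList = [ch] := by simp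
    rw [he, chars_count_singleton, PySem.List.count_eq] at this
    omega

-- ===== VERDICT (by name: the statement is the Claim_ definition above) =====
theorem search_prefix_spec : Claim_equal_search_prefix := by
  intro vocab plate _
  unfold Spec_search_prefix search_prefix search_prefix_alt
  rw [search_prefix_foldl_fst]
  rw [PySem.List.min?, List.foldl_filter]
  congr 1
  funext s w
  by_cases h : ((PySem.Set.ofList ((plate.toList.filter
      (fun ch => PySem.Chars.isalpha (PySem.Chars.lowerChar ch))).map PySem.Chars.lowerChar)).map
        (fun ch => (ch, PySem.List.count ((plate.toList.filter
          (fun ch => PySem.Chars.isalpha (PySem.Chars.lowerChar ch))).map PySem.Chars.lowerChar) ch))).all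
        (fun p => p.2 ≤ PySem.Str.count w (String.ofList [p.1])) = true
  · rw [if_pos h]
    simp only [pureStep, if_pos ((covers_iff plate w).mpr h)]
    cases s <;> rfl
  · rw [if_neg h]
    simp only [pureStep]
    rw [if_neg (fun hc => h ((covers_iff plate w).mp hc))]
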